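-- pv_equiv track=rewrite | github.com/younsuyoung12/baccarat-ai-engine | test_chinese_roads.py | build_big_road_structure
-- ===== SOURCE A (Python) =====
-- from typing import List, Tuple
--
-- def build_big_road_structure(pb_seq: List[str], max_rows=6):
--     """
--     Macau Standard Big Road
--     """
--     if not pb_seq:
--         return [], []
--
--     grid = {}
--     positions = []
--
--     for i, r in enumerate(pb_seq):
--         if i == 0:
--             col, row = 0, 0
--         else:
--             prev_r = pb_seq[i-1]
--             prev_col, prev_row = positions[-1]
--
--             if r == prev_r:
--                 # 아래로 떨어뜨리기
--                 new_row = prev_row + 1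
--                 if new_row < max_rows and (prev_col, new_row) not in grid:
--                     col, row = prev_col, new_row
--                 else:
--                     # 아래 막힘 → 오른쪽
--                     col, row = prev_col + 1, prev_row
--             else:
--                 # 색 바뀜 → 새로운 컬럼
--                 col, row = prev_col + 1, 0
--
--         positions.append((col, row))
--         grid[(col, row)] = r
--
--     # 매트릭스 생성
--     max_col = max(c for c, _ in positions)
--     matrix = []
--     for row in range(max_rows):
--         row_vals = []
--         for col in range(max_col + 1):
--             row_vals.append(grid.get((col, row), ""))
--         matrix.append(row_vals)
--
--     return matrix, positions
-- ===== SOURCE B (Python) =====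
-- from typing import List, Tuple
--
-- def build_big_road_structure(pb_seq: List[str], max_rows=6):
--     """Macau Standard Big Road, computed run by run: scan the sequence for
--     maximal runs of equal results, drop each run down its column (tailing right
--     when blocked), tracking per-column occupied rows; then scatter-fill the
--     matrix directly from the positions."""
--     if not pb_seq:
--         return [], []
--
--     positions = []
--     blocked = {}            # col -> set of occupied rows in that column
--     next_col = 0
--     i, n = 0, len(pb_seq)
--     while i < n:
--         r = pb_seq[i]
--         j = i + 1
--         while j < n and pb_seq[j] == r:
--             j += 1
--         # place the run pb_seq[i:j] starting at the top of column next_col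
--         col, row = next_col, 0
--         blocked.setdefault(col, set()).add(row)
--         positions.append((col, row))
--         for _ in range(j - i - 1):
--             if row + 1 < max_rows and (row + 1) not in blocked.get(col, ()):
--                 row += 1
--             else:
--                 col += 1
--             blocked.setdefault(col, set()).add(row)
--             positions.append((col, row))
--         next_col = col + 1
--         i = j
--
--     max_col = max(c for c, _ in positions)
--     matrix = [[""] * (max_col + 1) for _ in range(max_rows)]
--     for (col, row), r in zip(positions, pb_seq):
--         matrix[row][col] = r
--     return matrix, positions
-- ===== Notes on version B (the rewrite author's own statement) =====
-- stated objective: alternative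
-- what changed: B processes the sequence run by run (a while-scan finds each maximal run of equal results, then an inner loop drops that run down its column, tailing right when blocked) with a per-column set of occupied rows, instead of A's per-element enumerate loop comparing pb_seq[i-1] with a position-keyed grid dict; the matrix is scatter-filled from the positions instead of A's cell-by-cell grid.get double loop.
-- outside the precondition, e.g. on build_big_road_structure(['P'], 0): A returns ([], [(0, 0)]), B raises IndexError
import Mathlib
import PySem

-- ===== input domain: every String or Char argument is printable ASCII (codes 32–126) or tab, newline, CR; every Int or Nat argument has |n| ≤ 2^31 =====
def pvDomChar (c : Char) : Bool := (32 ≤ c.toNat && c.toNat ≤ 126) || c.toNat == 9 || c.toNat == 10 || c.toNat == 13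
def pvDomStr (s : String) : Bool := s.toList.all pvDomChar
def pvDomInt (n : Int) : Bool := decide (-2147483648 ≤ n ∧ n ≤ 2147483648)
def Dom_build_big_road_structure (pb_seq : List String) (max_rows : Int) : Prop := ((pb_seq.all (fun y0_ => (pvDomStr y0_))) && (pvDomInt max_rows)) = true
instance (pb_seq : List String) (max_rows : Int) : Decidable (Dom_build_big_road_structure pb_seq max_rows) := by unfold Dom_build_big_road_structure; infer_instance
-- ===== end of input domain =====

-- B replaces A's per-element enumerate loop over a position-keyed grid dict by a run-by-run
-- placement (scan maximal runs of equal results, drop each run down a column with a per-column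
-- set of occupied rows) and a direct scatter-fill of the matrix (objective: alternative
-- decomposition; return value proved equal on Pre_).

-- ===== PORT A =====
-- the main `for i, r in enumerate(pb_seq)` loop of A; state = (grid, positions)
def pvLoopA (pb_seq : List String) (max_rows : Int) :
    List (Int × String) → PySem.Dict (Int × Int) String → List (Int × Int) →
    PySem.Dict (Int × Int) String × List (Int × Int)
  | [], grid, positions => (grid, positions)
  | (i, r) :: rest, grid, positions =>
    let cr : Int × Int :=
      if i = 0 then (0, 0)
      else
        -- pb_seq[i-1] and positions[-1]: in range on every reached input (i ≥ 1, positions ≠ []),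
        -- so the total pyGetD form is exact here
        let prev_r := PySem.List.pyGetD pb_seq (i - 1) ""
        let prev := PySem.List.pyGetD positions (-1) (0, 0)
        if r = prev_r then
          let new_row := prev.2 + 1
          if new_row < max_rows ∧ grid.contains (prev.1, new_row) = false then
            (prev.1, new_row)
          else
            (prev.1 + 1, prev.2)
        else
          (prev.1 + 1, 0)
    pvLoopA pb_seq max_rows rest (grid.insert cr r) (positions ++ [cr])

def build_big_road_structure (pb_seq : List String) (max_rows : Int) : List (List String) × (List (Int × Int)) :=
  if pb_seq = [] then ([], [])
  else
    let st := pvLoopA pb_seq max_rows (PySem.List.enumerate pb_seq 0) PySem.Dict.empty []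
    let grid := st.1
    let positions := st.2
    -- max(c for c, _ in positions): positions ≠ [] on every reached input, so getD 0 is exact
    let max_col := (PySem.List.max? (positions.map Prod.fst) (fun x => x)).getD 0
    let matrix := (PySem.List.pyRange 0 max_rows 1).map (fun row =>
      (PySem.List.pyRange 0 (max_col + 1) 1).map (fun col => grid.getD (col, row) ""))
    (matrix, positions)

-- ===== PORT B =====
-- B's inner `for _ in range(j - i - 1)` loop: drop the rest of the current run down
-- column `col` (tail right when blocked); state = (col, row, blocked, positions)
def pvInnerB (max_rows : Int) :
    Nat → Int → Int → PySem.Dict Int (PySem.Set Int) → List (Int × Int) →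
    Int × Int × PySem.Dict Int (PySem.Set Int) × List (Int × Int)
  | 0, col, row, blocked, pos => (col, row, blocked, pos)
  | n + 1, col, row, blocked, pos =>
    let cr : Int × Int :=
      if row + 1 < max_rows ∧ ((blocked.getD col PySem.Set.empty).contains (row + 1)) = false
      then (col, row + 1) else (col + 1, row)
    pvInnerB max_rows n cr.1 cr.2
      (blocked.insert cr.1 ((blocked.getD cr.1 PySem.Set.empty).add cr.2))
      (pos ++ [cr])

-- B's outer `while i < n` loop: the inner `while j < n and pb_seq[j] == r` scan is the
-- takeWhile/dropWhile split of the remaining list (exact: it takes the maximal prefix equal to r)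
def pvOuterB (max_rows : Int) :
    List String → PySem.Dict Int (PySem.Set Int) → Int → List (Int × Int) → List (Int × Int)
  | [], _, _, pos => pos
  | r :: tl, blocked, next_col, pos =>
    let run := tl.takeWhile (fun x => x == r)
    let rest := tl.dropWhile (fun x => x == r)
    let blocked1 := blocked.insert next_col ((blocked.getD next_col PySem.Set.empty).add 0)
    let st := pvInnerB max_rows run.length next_col 0 blocked1 (pos ++ [(next_col, 0)])
    pvOuterB max_rows rest st.2.2.1 (st.1 + 1) st.2.2.2
  termination_by l => l.length
  decreasing_by
    have := List.length_dropWhile_le (p := fun x => x == r) (l := tl)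
    simp only [List.length_cons]
    omega

-- matrix[row][col] = v; exact for the in-range nonnegative indices B's scatter loop reaches under Pre_
def pvSet2d (m : List (List String)) (row col : Int) (v : String) : List (List String) :=
  m.set row.toNat ((m.getD row.toNat []).set col.toNat v)

def build_big_road_structure_alt (pb_seq : List String) (max_rows : Int) : List (List String) × (List (Int × Int)) :=
  if pb_seq = [] then ([], [])
  else
    let positions := pvOuterB max_rows pb_seq PySem.Dict.empty 0 []
    let max_col := (PySem.List.max? (positions.map Prod.fst) (fun x => x)).getD 0
    let matrix0 := List.replicate max_rows.toNat (List.replicate (max_col + 1).toNat "")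
    let matrix := (positions.zip pb_seq).foldl (fun m p => pvSet2d m p.1.2 p.1.1 p.2) matrix0
    (matrix, positions)

-- ===== PRECONDITION & SPEC =====
-- Pre_ excludes nonempty pb_seq with max_rows ≤ 0: A returns an empty matrix there, while B's
-- scatter write into the empty matrix raises IndexError (B's own algorithm has no value there).
def Pre_build_big_road_structure (pb_seq : List String) (max_rows : Int) : Prop :=
  pb_seq = [] ∨ 1 ≤ max_rows
instance (pb_seq : List String) (max_rows : Int) : Decidable (Pre_build_big_road_structure pb_seq max_rows) := by
  unfold Pre_build_big_road_structure; infer_instance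

def pvWitness_build_big_road_structure : List String × Int := (["P", "P", "B", "B", "B", "P"], 3)

def Spec_build_big_road_structure (pb_seq : List String) (max_rows : Int) (out : List (List String) × (List (Int × Int))) : Prop := out = build_big_road_structure_alt pb_seq max_rows
instance (pb_seq : List String) (max_rows : Int) (out : List (List String) × (List (Int × Int))) : Decidable (Spec_build_big_road_structure pb_seq max_rows out) := by unfold Spec_build_big_road_structure; infer_instance

-- ===== CLAIM (what is proved, stated in full; the proofs are below) =====
def Claim_equal_build_big_road_structure : Prop := ∀ (pb_seq : List String) (max_rows : Int), Dom_build_big_road_structure pb_seq max_rows → Pre_build_big_road_structure pb_seq max_rows → Spec_build_big_road_structure pb_seq max_rows (build_big_road_structure pb_seq max_rows)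

-- ===== LEMMAS AND PROOFS =====

-- proof-side per-element reference loop: A's placement rule with an occupancy set;
-- both ports are proved equal to it
def pvLoopB (max_rows : Int) :
    List String → Option String → Int × Int → PySem.Set (Int × Int) → List (Int × Int) →
    List (Int × Int)
  | [], _, _, _, positions => positions
  | r :: rest, prevR, prev, occ, positions =>
    let cr : Int × Int :=
      match prevR with
      | none => (0, 0)
      | some pr =>
        if r = pr then
          let new_row := prev.2 + 1
          if new_row < max_rows ∧ occ.contains (prev.1, new_row) = false then
            (prev.1, new_row)
          else
            (prev.1 + 1, prev.2)
        else
          (prev.1 + 1, 0)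
    pvLoopB max_rows rest (some r) cr (occ.add cr) (positions ++ [cr])

def pvIns (g : PySem.Dict (Int × Int) String) (q : (Int × Int) × String) : PySem.Dict (Int × Int) String :=
  g.insert q.1 q.2

def pvRowOf (g : PySem.Dict (Int × Int) String) (W : Nat) (k : Nat) : List String :=
  (List.range W).map (fun (j : Nat) => g.getD (((j : Nat) : Int), (k : Int)) "")

def pvMatOf (g : PySem.Dict (Int × Int) String) (R W : Nat) : List (List String) :=
  (List.range R).map (pvRowOf g W)

-- relation between the pair-set occupancy and B's per-column row sets
def pvRel (occ : PySem.Set (Int × Int)) (blocked : PySem.Dict Int (PySem.Set Int)) : Prop :=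
  ∀ c q : Int, occ.contains (c, q) = ((blocked.getD c PySem.Set.empty).contains q)

lemma pvSet_contains_add (s : PySem.Set (Int × Int)) (x k : Int × Int) :
    (PySem.Set.add s x).contains k = (k == x || s.contains k) := by
  simp [PySem.Set.add]
  split_ifs with h
  · simp at *
    by_cases hk : k = x <;> simp [hk, h]
  · simp
    by_cases hk : k = x <;> simp [hk]

lemma pvSetI_contains_add (s : PySem.Set Int) (x k : Int) :
    (PySem.Set.add s x).contains k = (k == x || s.contains k) := by
  simp [PySem.Set.add]
  split_ifs with h
  · simp at *
    by_cases hk : k = x <;> simp [hk, h]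
  · simp
    by_cases hk : k = x <;> simp [hk]

lemma pvRel_add (occ : PySem.Set (Int × Int)) (blocked : PySem.Dict Int (PySem.Set Int))
    (a b : Int) (h : pvRel occ blocked) :
    pvRel (occ.add (a, b)) (blocked.insert a ((blocked.getD a PySem.Set.empty).add b)) := by
  intro c q
  rw [pvSet_contains_add, PySem.Dict.getD_insert]
  by_cases hc : c = a
  · subst hc
    rw [if_pos rfl, pvSetI_contains_add, h]
    by_cases hq : q = b
    · subst hq; simp
    · have h1 : ((c, q) == (c, b)) = false := by simp [hq]
      have h2 : (q == b) = false := by simp [hq]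
      rw [h1, h2]
  · rw [if_neg hc, h]
    have h1 : ((c, q) == (a, b)) = false := by simp [hc]
    rw [h1]
    simp

lemma pvLoopB_append (max_rows : Int) :
    ∀ (rest : List String) (prevR : Option String) (prev : Int × Int)
      (occ : PySem.Set (Int × Int)) (pos : List (Int × Int)),
      pvLoopB max_rows rest prevR prev occ pos = pos ++ pvLoopB max_rows rest prevR prev occ [] := by
  intro rest
  induction rest with
  | nil => intro prevR prev occ pos; simp [pvLoopB]
  | cons r rest ih =>
    intro prevR prev occ pos
    simp only [pvLoopB]
    rw [ih _ _ _ (pos ++ _), ih _ _ _ ([] ++ _)]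
    simp

lemma pvPyGetD_neg_one (pos : List (Int × Int)) (prev : Int × Int) (h : pos.getLast? = some prev) :
    PySem.List.pyGetD pos (-1) ((0:Int),(0:Int)) = prev := by
  have hne : pos ≠ [] := by rintro rfl; simp at h
  have hlen : 1 ≤ pos.length := List.length_pos_iff.2 hne
  simp only [PySem.List.pyGetD, PySem.List.pyGet?, PySem.List.pyIdx?]
  rw [if_neg (by omega), if_pos (by omega)]
  simp only [Option.bind_some]
  rw [List.getLast?_eq_getElem?] at h
  have : pos.length - (-(-1:Int)).toNat = pos.length - 1 := by norm_num
  rw [this, h]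
  rfl

lemma pvLoop_agree (pb_seq : List String) (max_rows : Int) :
    ∀ (rest : List String) (i : Int) (grid : PySem.Dict (Int × Int) String)
      (occ : PySem.Set (Int × Int)) (pos : List (Int × Int)) (prev : Int × Int) (pr : String),
      1 ≤ i →
      pb_seq.drop i.toNat = rest →
      PySem.List.pyGetD pb_seq (i - 1) "" = pr →
      pos.getLast? = some prev →
      (∀ k, grid.contains k = occ.contains k) →
      pvLoopA pb_seq max_rows (PySem.List.enumerate rest i) grid pos
        = ((pvLoopB max_rows rest (some pr) prev occ []).zip rest |>.foldl pvIns grid,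
           pvLoopB max_rows rest (some pr) prev occ pos) := by
  intro rest
  induction rest with
  | nil =>
    intro i grid occ pos prev pr hi hdrop hpr hlast hmem
    simp [PySem.List.enumerate, pvLoopA, pvLoopB]
  | cons r rest ih =>
    intro i grid occ pos prev pr hi hdrop hpr hlast hmem
    have hi0 : ¬ (i = 0) := by omega
    rw [PySem.List.enumerate_cons]
    simp only [pvLoopA, pvLoopB, if_neg hi0, hpr, pvPyGetD_neg_one pos prev hlast, hmem]
    set c : Int × Int := (if r = pr then
        if prev.2 + 1 < max_rows ∧ occ.contains (prev.1, prev.2 + 1) = false then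
          (prev.1, prev.2 + 1)
        else (prev.1 + 1, prev.2)
      else (prev.1 + 1, 0)) with hc
    have hget : pb_seq[i.toNat]? = some r := by
      have := congrArg (fun l => l[0]?) hdrop
      simpa using this
    have hrec := ih (i + 1) (grid.insert c r) (occ.add c) (pos ++ [c]) c r
      (by omega)
      (by
        have : (i + 1).toNat = i.toNat + 1 := by omega
        rw [this]
        have h2 := congrArg (fun l => List.drop 1 l) hdrop
        simp only [List.drop_drop] at h2
        simpa using h2)
      (by
        have h1 : i + 1 - 1 = (i.toNat : Int) := by omega
        rw [h1, PySem.List.pyGetD_natCast]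
        rw [List.getD_eq_getElem?_getD, hget]
        rfl)
      (by simp)
      (by
        intro k
        rw [PySem.Dict.contains_insert, pvSet_contains_add, hmem])
    rw [hrec]
    rw [pvLoopB_append max_rows rest (some r) c (occ.add c) ([] ++ [c])]
    simp [pvIns]

-- the inner run-placement loop of B agrees with the per-element reference loop on a run of r's
lemma pvInner_agree (max_rows : Int) (r : String) :
    ∀ (run : List String), (∀ x ∈ run, x = r) →
    ∀ (rest : List String) (col row : Int) (occ : PySem.Set (Int × Int))
      (blocked : PySem.Dict Int (PySem.Set Int)) (pos : List (Int × Int)),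
      pvRel occ blocked →
      ∃ occ' : PySem.Set (Int × Int),
        pvLoopB max_rows (run ++ rest) (some r) (col, row) occ pos
          = pvLoopB max_rows rest (some r)
              ((pvInnerB max_rows run.length col row blocked pos).1,
               (pvInnerB max_rows run.length col row blocked pos).2.1)
              occ' ((pvInnerB max_rows run.length col row blocked pos).2.2.2)
        ∧ pvRel occ' (pvInnerB max_rows run.length col row blocked pos).2.2.1 := by
  intro run
  induction run with
  | nil =>
    intro _ rest col row occ blocked pos hrel
    exact ⟨occ, rfl, hrel⟩
  | cons x run ih =>
    intro hall rest col row occ blocked pos hrel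
    have hx : x = r := hall x (by simp)
    subst hx
    simp only [List.cons_append, pvLoopB, List.length_cons, pvInnerB, if_true]
    rw [hrel col (row + 1)]
    set cr : Int × Int :=
      (if row + 1 < max_rows ∧ ((blocked.getD col PySem.Set.empty).contains (row + 1)) = false
       then (col, row + 1) else (col + 1, row)) with hcr
    have hocc : occ.add cr = occ.add (cr.1, cr.2) := by rfl
    have hrel' : pvRel (occ.add cr)
        (blocked.insert cr.1 ((blocked.getD cr.1 PySem.Set.empty).add cr.2)) := by
      rw [hocc]; exact pvRel_add occ blocked cr.1 cr.2 hrel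
    exact ih (fun y hy => hall y (by simp [hy])) rest cr.1 cr.2 (occ.add cr) _ (pos ++ [cr]) hrel'

def pvCellB (max_rows : Int) (occ : PySem.Set (Int × Int)) (prev : Int × Int) (r : String) :
    Option String → Int × Int
  | none => (0, 0)
  | some pr =>
    if r = pr then
      if prev.2 + 1 < max_rows ∧ occ.contains (prev.1, prev.2 + 1) = false then
        (prev.1, prev.2 + 1)
      else (prev.1 + 1, prev.2)
    else (prev.1 + 1, 0)

lemma pvLoopB_cons (max_rows : Int) (r : String) (rest : List String) (prevR : Option String)
    (prev : Int × Int) (occ : PySem.Set (Int × Int)) (pos : List (Int × Int)) :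
    pvLoopB max_rows (r :: rest) prevR prev occ pos
      = pvLoopB max_rows rest (some r) (pvCellB max_rows occ prev r prevR)
          (occ.add (pvCellB max_rows occ prev r prevR))
          (pos ++ [pvCellB max_rows occ prev r prevR]) := by
  cases prevR <;> rfl

lemma pvHead_dropWhile (p : String → Bool) :
    ∀ (l : List String) (x : String), (l.dropWhile p).head? = some x → p x = false := by
  intro l
  induction l with
  | nil => intro x h; simp at h
  | cons a l ih =>
    intro x h
    by_cases ha : p a
    · rw [List.dropWhile_cons_of_pos ha] at h
      exact ih x h
    · rw [List.dropWhile_cons_of_neg ha] at h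
      simp at h
      subst h
      simpa using ha

-- the outer run loop of B agrees with the per-element reference loop
lemma pvOuter_agree (max_rows : Int) :
    ∀ (n : Nat) (l : List String), l.length ≤ n → ∀ (prevR : Option String) (prev : Int × Int)
      (occ : PySem.Set (Int × Int)) (blocked : PySem.Dict Int (PySem.Set Int))
      (pos : List (Int × Int)) (next_col : Int),
      pvRel occ blocked →
      (∀ pr x, prevR = some pr → l.head? = some x → x ≠ pr) →
      (match prevR with | none => next_col = 0 | some _ => next_col = prev.1 + 1) →
      pvLoopB max_rows l prevR prev occ pos = pvOuterB max_rows l blocked next_col pos := by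
  intro n
  induction n with
  | zero =>
    intro l hl
    have hl0 : l = [] := by cases l with | nil => rfl | cons a t => simp at hl
    subst hl0
    intro prevR prev occ blocked pos next_col _ _ _
    cases prevR <;> simp [pvLoopB, pvOuterB]
  | succ n IH =>
    intro l hl
    cases l with
    | nil =>
      intro prevR prev occ blocked pos next_col _ _ _
      cases prevR <;> simp [pvLoopB, pvOuterB]
    | cons r tl =>
      simp only [List.length_cons] at hl
      intro prevR prev occ blocked pos next_col hrel hbound hcol
      have hcr : pvCellB max_rows occ prev r prevR = (next_col, (0:Int)) := by
        cases prevR with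
        | none => simp at hcol; simp [pvCellB, hcol]
        | some pr =>
          have hne : r ≠ pr := hbound pr r rfl (by simp)
          simp at hcol
          simp [pvCellB, hne, hcol]
      rw [pvLoopB_cons, hcr]
      rw [show pvOuterB max_rows (r :: tl) blocked next_col pos =
          pvOuterB max_rows (tl.dropWhile (fun x => x == r))
            ((pvInnerB max_rows (tl.takeWhile (fun x => x == r)).length next_col 0
              (blocked.insert next_col ((blocked.getD next_col PySem.Set.empty).add 0))
              (pos ++ [(next_col, 0)])).2.2.1)
            ((pvInnerB max_rows (tl.takeWhile (fun x => x == r)).length next_col 0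
              (blocked.insert next_col ((blocked.getD next_col PySem.Set.empty).add 0))
              (pos ++ [(next_col, 0)])).1 + 1)
            ((pvInnerB max_rows (tl.takeWhile (fun x => x == r)).length next_col 0
              (blocked.insert next_col ((blocked.getD next_col PySem.Set.empty).add 0))
              (pos ++ [(next_col, 0)])).2.2.2) from by rw [pvOuterB]]
      have hsplit : tl = tl.takeWhile (fun x => x == r) ++ tl.dropWhile (fun x => x == r) :=
        (List.takeWhile_append_dropWhile (p := fun x => x == r) (l := tl)).symm
      have hrel1 : pvRel (occ.add (next_col, 0))
          (blocked.insert next_col ((blocked.getD next_col PySem.Set.empty).add 0)) :=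
        pvRel_add occ blocked next_col 0 hrel
      have hall : ∀ x ∈ tl.takeWhile (fun x => x == r), x = r := by
        intro x hx
        have := List.mem_takeWhile_imp hx
        simpa using this
    -- apply the inner agreement on the run
      obtain ⟨occ', heq, hrel'⟩ :=
        pvInner_agree max_rows r (tl.takeWhile (fun x => x == r)) hall
          (tl.dropWhile (fun x => x == r)) next_col 0 (occ.add (next_col, 0))
          (blocked.insert next_col ((blocked.getD next_col PySem.Set.empty).add 0))
          (pos ++ [(next_col, 0)]) hrel1
      rw [show occ.add (next_col, (0:Int)) = occ.add ((next_col, (0:Int)) : Int × Int) from rfl]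
      conv_lhs => rw [hsplit]
      rw [heq]
      apply IH
      · have := List.length_dropWhile_le (p := fun x => x == r) (l := tl)
        omega
      · exact hrel'
      · intro pr x hpr hx
        cases hpr
        have := pvHead_dropWhile (fun x => x == r) tl x hx
        simpa using this
      · simp

lemma pvLoopB_bounds (max_rows : Int) (hmr : 1 ≤ max_rows) :
    ∀ (rest : List String) (prevR : Option String) (prev : Int × Int)
      (occ : PySem.Set (Int × Int)) (pos : List (Int × Int)),
      0 ≤ prev.1 → 0 ≤ prev.2 → prev.2 < max_rows →
      ∀ q ∈ pvLoopB max_rows rest prevR prev occ pos,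
        q ∈ pos ∨ (0 ≤ q.1 ∧ 0 ≤ q.2 ∧ q.2 < max_rows) := by
  intro rest
  induction rest with
  | nil => intro prevR prev occ pos _ _ _ q hq; exact Or.inl (by simpa [pvLoopB] using hq)
  | cons r rest ih =>
    intro prevR prev occ pos h1 h2 h3 q hq
    simp only [pvLoopB] at hq
    have key : ∀ cr : Int × Int, 0 ≤ cr.1 → 0 ≤ cr.2 → cr.2 < max_rows →
        q ∈ pvLoopB max_rows rest (some r) cr (occ.add cr) (pos ++ [cr]) →
        q ∈ pos ∨ (0 ≤ q.1 ∧ 0 ≤ q.2 ∧ q.2 < max_rows) := by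
      intro cr hc1 hc2 hc3 hq'
      rcases ih (some r) cr (occ.add cr) (pos ++ [cr]) hc1 hc2 hc3 q hq' with h | h
      · rcases List.mem_append.1 h with h | h
        · exact Or.inl h
        · simp at h; subst h; exact Or.inr ⟨hc1, hc2, hc3⟩
      · exact Or.inr h
    rcases prevR with _ | pr
    · exact key (0, 0) le_rfl le_rfl (by omega) hq
    · by_cases hr : r = pr
      · subst hr
        simp only [reduceIte] at hq
        by_cases hcond : prev.2 + 1 < max_rows ∧ occ.contains (prev.1, prev.2 + 1) = false
        · rw [if_pos hcond] at hq
          exact key (prev.1, prev.2 + 1) h1 (by omega) hcond.1 hq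
        · rw [if_neg hcond] at hq
          exact key (prev.1 + 1, prev.2) (by simp; omega) h2 h3 hq
      · simp only [if_neg hr] at hq
        exact key (prev.1 + 1, 0) (by simp; omega) le_rfl (by omega) hq

lemma pvRowOf_getElem (g : PySem.Dict (Int × Int) String) (W k j : Nat) (h : j < W) :
    (pvRowOf g W k)[j]'(by simp [pvRowOf]; omega) = g.getD ((j : Int), (k : Int)) "" := by
  unfold pvRowOf
  rw [List.getElem_map, List.getElem_range]

lemma pvRowOf_length (g : PySem.Dict (Int × Int) String) (W k : Nat) :
    (pvRowOf g W k).length = W := by simp [pvRowOf]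

lemma pvMatOf_getElem (g : PySem.Dict (Int × Int) String) (R W k : Nat) (h : k < R) :
    (pvMatOf g R W)[k]'(by simp [pvMatOf]; omega) = pvRowOf g W k := by
  unfold pvMatOf
  rw [List.getElem_map, List.getElem_range]

lemma pvMatOf_length (g : PySem.Dict (Int × Int) String) (R W : Nat) :
    (pvMatOf g R W).length = R := by simp [pvMatOf]

lemma pvSet2d_matOf (g : PySem.Dict (Int × Int) String) (R W : Nat) (col row : Int) (v : String)
    (hc0 : 0 ≤ col) (hr0 : 0 ≤ row) (hrR : row.toNat < R) :
    pvSet2d (pvMatOf g R W) row col v = pvMatOf (g.insert (col, row) v) R W := by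
  have hgetD : (pvMatOf g R W).getD row.toNat [] = pvRowOf g W row.toNat := by
    rw [List.getD_eq_getElem _ _ (by rw [pvMatOf_length]; exact hrR)]
    exact pvMatOf_getElem g R W row.toNat hrR
  unfold pvSet2d
  rw [hgetD]
  apply List.ext_getElem
  · simp [pvMatOf_length]
  · intro k hk1 hk2
    rw [pvMatOf_length] at hk2
    rw [List.getElem_set, pvMatOf_getElem g R W k hk2, pvMatOf_getElem (g.insert (col, row) v) R W k hk2]
    by_cases hk : row.toNat = k
    · subst hk
      rw [if_pos rfl]
      apply List.ext_getElem
      · simp [pvRowOf_length]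
      · intro j hj1 hj2
        rw [pvRowOf_length] at hj2
        rw [List.getElem_set, pvRowOf_getElem (g.insert (col, row) v) W row.toNat j hj2,
          PySem.Dict.getD_insert, pvRowOf_getElem g W row.toNat j hj2]
        by_cases hjc : col.toNat = j
        · rw [if_pos hjc, if_pos (by
            rw [Prod.ext_iff]
            constructor <;> simp <;> omega)]
        · rw [if_neg hjc, if_neg (by
            rw [Prod.ext_iff]
            rintro ⟨hh1, hh2⟩
            simp at hh1
            omega)]
    · rw [if_neg hk]
      apply List.ext_getElem
      · simp [pvRowOf_length]
      · intro j hj1 hj2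
        rw [pvRowOf_length] at hj2
        rw [pvRowOf_getElem _ W k j hj2, pvRowOf_getElem _ W k j hj2, PySem.Dict.getD_insert,
          if_neg (by
            rw [Prod.ext_iff]
            rintro ⟨hh1, hh2⟩
            simp at hh2
            omega)]

lemma pvScatter_matOf (R W : Nat) :
    ∀ (L : List ((Int × Int) × String)) (g : PySem.Dict (Int × Int) String),
      (∀ q ∈ L, 0 ≤ q.1.1 ∧ q.1.1.toNat < W ∧ 0 ≤ q.1.2 ∧ q.1.2.toNat < R) →
      L.foldl (fun m p => pvSet2d m p.1.2 p.1.1 p.2) (pvMatOf g R W)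
        = pvMatOf (L.foldl pvIns g) R W := by
  intro L
  induction L with
  | nil => intro g _; rfl
  | cons q L ih =>
    intro g hb
    simp only [List.foldl_cons]
    obtain ⟨h1, h2, h3, h4⟩ := hb q (by simp)
    rw [pvSet2d_matOf g R W q.1.1 q.1.2 q.2 h1 h3 h4]
    exact ih _ (fun p hp => hb p (by simp [hp]))

lemma pvMatOf_empty (R W : Nat) :
    List.replicate R (List.replicate W "") = pvMatOf PySem.Dict.empty R W := by
  unfold pvMatOf pvRowOf
  simp [PySem.Dict.getD_empty, List.map_const']

lemma pvPyMat (g : PySem.Dict (Int × Int) String) (mr M : Int) :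
    (PySem.List.pyRange 0 mr 1).map (fun row =>
      (PySem.List.pyRange 0 (M + 1) 1).map (fun col => g.getD (col, row) ""))
      = pvMatOf g mr.toNat (M + 1).toNat := by
  rw [PySem.List.pyRange_one 0 mr, PySem.List.pyRange_one 0 (M + 1)]
  unfold pvMatOf pvRowOf
  simp only [List.map_map, Int.sub_zero]
  apply List.map_congr_left
  intro k _
  simp only [Function.comp]
  apply List.map_congr_left
  intro j _
  simp

-- ===== VERDICT (by name: the statement is the Claim_ definition above) =====
theorem build_big_road_structure_spec : Claim_equal_build_big_road_structure := by
  intro pb_seq max_rows _ hpre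
  unfold Spec_build_big_road_structure
  cases pb_seq with
  | nil => rfl
  | cons p0 ptl =>
    have hmr : 1 ≤ max_rows := by
      rcases hpre with h | h
      · exact absurd h (by simp)
      · exact h
    -- shared first step of both loops
    have hgrid1 : ∀ k, (PySem.Dict.empty.insert ((0:Int),(0:Int)) p0).contains k
        = (PySem.Set.add PySem.Set.empty ((0:Int),(0:Int))).contains k := by
      intro k
      rw [PySem.Dict.contains_insert, pvSet_contains_add]
      simp [PySem.Set.empty]
    have hpr0 : PySem.List.pyGetD (p0 :: ptl) ((1:Int) - 1) "" = p0 := by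
      norm_num [PySem.List.pyGetD_ofNat']
    have hagree := pvLoop_agree (p0 :: ptl) max_rows ptl 1
      (PySem.Dict.empty.insert ((0:Int),(0:Int)) p0)
      (PySem.Set.add PySem.Set.empty ((0:Int),(0:Int)))
      [((0:Int),(0:Int))] ((0:Int),(0:Int)) p0
      le_rfl rfl hpr0 (by simp) hgrid1
    -- names for the shared pieces
    set occ1 := PySem.Set.add PySem.Set.empty ((0:Int),(0:Int)) with hocc1
    set D := pvLoopB max_rows ptl (some p0) ((0:Int),(0:Int)) occ1 [] with hD
    set P := pvLoopB max_rows ptl (some p0) ((0:Int),(0:Int)) occ1 [((0:Int),(0:Int))] with hP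
    have hPD : P = ((0:Int),(0:Int)) :: D := by
      rw [hP, pvLoopB_append]
      rfl
    -- the reference per-element loop on the whole list, one step unfolded
    have hBloop : pvLoopB max_rows (p0 :: ptl) none ((0:Int),(0:Int)) PySem.Set.empty [] = P := by
      simp only [pvLoopB]
      rfl
    -- B's run loop equals the reference loop
    have hrel0 : pvRel PySem.Set.empty PySem.Dict.empty := by
      intro c q
      simp [PySem.Set.empty, PySem.Dict.getD_empty]
    have hOuter : pvOuterB max_rows (p0 :: ptl) PySem.Dict.empty 0 [] = P := by
      rw [← pvOuter_agree max_rows (p0 :: ptl).length (p0 :: ptl) le_rfl none ((0:Int),(0:Int))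
        PySem.Set.empty PySem.Dict.empty [] 0 hrel0 (by intro pr x h; cases h) (by simp)]
      exact hBloop
    -- bounds of every produced cell
    have hbnd : ∀ q ∈ P, 0 ≤ q.1 ∧ 0 ≤ q.2 ∧ q.2 < max_rows := by
      intro q hq
      have := pvLoopB_bounds max_rows hmr (p0 :: ptl) none ((0:Int),(0:Int)) PySem.Set.empty []
        le_rfl le_rfl (by omega) q (by rw [hBloop]; exact hq)
      simpa using this
    -- the column maximum
    obtain ⟨M, hM⟩ : ∃ m, PySem.List.max? (P.map Prod.fst) (fun x => x) = some m := by
      have hne : P.map Prod.fst ≠ [] := by rw [hPD]; simp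
      rcases hmx : PySem.List.max? (P.map Prod.fst) (fun x => x) with _ | m
      · rw [PySem.List.max?_eq_none_iff] at hmx
        exact absurd hmx hne
      · exact ⟨m, rfl⟩
    have hM0 : 0 ≤ M := by
      have hmem : (0:Int) ∈ P.map Prod.fst := by rw [hPD]; simp
      exact PySem.List.max?_id_le hM _ hmem
    have hMmax : ∀ q ∈ P, q.1 ≤ M := by
      intro q hq
      exact PySem.List.max?_id_le hM _ (List.mem_map_of_mem hq)
    -- evaluate port A
    have hAeq : build_big_road_structure (p0 :: ptl) max_rows
        = ((PySem.List.pyRange 0 max_rows 1).map (fun row =>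
            (PySem.List.pyRange 0 (M + 1) 1).map (fun col =>
              (List.foldl pvIns (PySem.Dict.empty.insert ((0:Int),(0:Int)) p0) (D.zip ptl)).getD (col, row) "")),
           P) := by
      simp only [build_big_road_structure, if_neg (List.cons_ne_nil p0 ptl)]
      rw [PySem.List.enumerate_cons]
      simp only [pvLoopA, if_true, zero_add, List.nil_append]
      rw [hagree]
      simp only [hM, Option.getD_some]
    -- evaluate port B
    have hBeq : build_big_road_structure_alt (p0 :: ptl) max_rows
        = ((P.zip (p0 :: ptl)).foldl (fun m p => pvSet2d m p.1.2 p.1.1 p.2)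
            (List.replicate max_rows.toNat (List.replicate (M + 1).toNat "")), P) := by
      simp only [build_big_road_structure_alt, if_neg (List.cons_ne_nil p0 ptl)]
      rw [hOuter, hM]
      rfl
    rw [hAeq, hBeq]
    -- matrices agree: scatter fill equals the dict read-out
    have hmat : (P.zip (p0 :: ptl)).foldl (fun m p => pvSet2d m p.1.2 p.1.1 p.2)
          (List.replicate max_rows.toNat (List.replicate (M + 1).toNat ""))
        = (PySem.List.pyRange 0 max_rows 1).map (fun row =>
            (PySem.List.pyRange 0 (M + 1) 1).map (fun col =>
              (List.foldl pvIns (PySem.Dict.empty.insert ((0:Int),(0:Int)) p0) (D.zip ptl)).getD (col, row) "")) := by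
      rw [pvPyMat _ max_rows M]
      rw [pvMatOf_empty, hPD, List.zip_cons_cons, List.foldl_cons]
      have hR0 : (0:Int).toNat < max_rows.toNat := by omega
      rw [show pvSet2d (pvMatOf PySem.Dict.empty max_rows.toNat (M + 1).toNat) (0:Int) (0:Int) p0
            = pvMatOf (PySem.Dict.empty.insert ((0:Int),(0:Int)) p0) max_rows.toNat (M + 1).toNat
          from pvSet2d_matOf _ _ _ 0 0 p0 le_rfl le_rfl hR0]
      apply pvScatter_matOf
      intro q hq
      have hqD : q.1 ∈ D := (List.of_mem_zip hq).1
      have hqP : q.1 ∈ P := by rw [hPD]; exact List.mem_cons_of_mem _ hqD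
      obtain ⟨hb1, hb2, hb3⟩ := hbnd q.1 hqP
      have hle := hMmax q.1 hqP
      exact ⟨hb1, by omega, hb2, by omega⟩
    rw [hmat]
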